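-- pv_equiv track=rewrite | github.com/Teizinn/Trabalho-Automatos | parteB.py | verifica_tres_uns
-- ===== SOURCE A (Python) =====
-- def verifica_tres_uns(palavra):
--     estado = 'q0'
--
--     for simbolo in palavra:
--         if simbolo not in {'0', '1'}:
--             return False  # caractere inválido
--
--         if estado == 'q0':
--             if simbolo == '1':
--                 estado = 'q1'
--             elif simbolo == '0':
--                 estado = 'q0'
--         elif estado == 'q1':
--             if simbolo == '1':
--                 estado = 'q2'
--             elif simbolo == '0':
--                 estado = 'q1'
--         elif estado == 'q2':
--             if simbolo == '1':
--                 estado = 'q3'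
--             elif simbolo == '0':
--                 estado = 'q2'
--         elif estado == 'q3':
--             if simbolo == '1':
--                 return False  # Quarto '1' encontrado – rejeita
--             elif simbolo == '0':
--                 estado = 'q3'
--
--     return estado == 'q3'
-- ===== SOURCE B (Python) =====
-- def verifica_tres_uns(palavra):
--     if any(c not in {'0', '1'} for c in palavra):
--         return False
--     return palavra.count('1') == 3
-- ===== Notes on version B (the rewrite author's own statement) =====
-- stated objective: simpler
-- what changed: Replaces the explicit 4-state DFA loop over states q0..q3 with a validate-then-count decomposition: one any() pass rejecting non-binary characters, then comparing str.count of the one-character to three.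
import Mathlib
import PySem

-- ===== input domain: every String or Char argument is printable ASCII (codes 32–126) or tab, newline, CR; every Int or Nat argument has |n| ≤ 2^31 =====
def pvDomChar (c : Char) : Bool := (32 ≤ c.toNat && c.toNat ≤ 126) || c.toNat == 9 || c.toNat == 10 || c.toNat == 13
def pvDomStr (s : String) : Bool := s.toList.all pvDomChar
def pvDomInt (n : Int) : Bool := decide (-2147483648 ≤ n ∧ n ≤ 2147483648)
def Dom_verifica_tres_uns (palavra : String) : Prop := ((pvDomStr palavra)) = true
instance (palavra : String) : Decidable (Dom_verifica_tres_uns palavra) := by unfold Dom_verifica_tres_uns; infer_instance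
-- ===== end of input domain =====

-- B replaces A's explicit 4-state DFA loop with a validate-then-count decomposition (objective: simpler).


-- ===== PORT A =====
-- the DFA loop of A: state is the string 'q0'/'q1'/'q2'/'q3'; early `return False` on an
-- invalid character and on a fourth '1'; at the end, accept iff the state is 'q3'
def verificaLoop : List Char → String → Bool
  | [], estado => estado == "q3"
  | simbolo :: rest, estado =>
    if ¬ (simbolo = '0' ∨ simbolo = '1') then false
    else if estado == "q0" then
      if simbolo == '1' then verificaLoop rest "q1" else verificaLoop rest "q0"
    else if estado == "q1" then
      if simbolo == '1' then verificaLoop rest "q2" else verificaLoop rest "q1"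
    else if estado == "q2" then
      if simbolo == '1' then verificaLoop rest "q3" else verificaLoop rest "q2"
    else if estado == "q3" then
      if simbolo == '1' then false else verificaLoop rest "q3"
    else verificaLoop rest estado

def verifica_tres_uns (palavra : String) : Bool :=
  verificaLoop palavra.toList "q0"

-- ===== PORT B =====
def verifica_tres_uns_alt (palavra : String) : Bool :=
  if palavra.toList.any (fun c => ¬ (c = '0' ∨ c = '1')) then false
  else palavra.toList.count '1' == 3

-- ===== PRECONDITION & SPEC =====
def Spec_verifica_tres_uns (palavra : String) (out : Bool) : Prop := out = verifica_tres_uns_alt palavra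
instance (palavra : String) (out : Bool) : Decidable (Spec_verifica_tres_uns palavra out) := by unfold Spec_verifica_tres_uns; infer_instance

-- ===== CLAIM (what is proved, stated in full; the proofs are below) =====
def Claim_equal_verifica_tres_uns : Prop := ∀ (palavra : String), Dom_verifica_tres_uns palavra → Spec_verifica_tres_uns palavra (verifica_tres_uns palavra)

-- ===== LEMMAS AND PROOFS =====

-- Characterisation of A's loop from each reachable state qk: it succeeds iff every
-- character is binary and the remaining count of '1's is exactly 3 - k.
theorem verificaLoop_char (l : List Char) :
    (verificaLoop l "q0" = (l.all (fun c => decide (c = '0' ∨ c = '1')) && (l.count '1' == 3))) ∧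
    (verificaLoop l "q1" = (l.all (fun c => decide (c = '0' ∨ c = '1')) && (l.count '1' == 2))) ∧
    (verificaLoop l "q2" = (l.all (fun c => decide (c = '0' ∨ c = '1')) && (l.count '1' == 1))) ∧
    (verificaLoop l "q3" = (l.all (fun c => decide (c = '0' ∨ c = '1')) && (l.count '1' == 0))) := by
  induction l with
  | nil => simp [verificaLoop]
  | cons c l ih =>
    obtain ⟨h0, h1, h2, h3⟩ := ih
    by_cases hv : c = '0' ∨ c = '1'
    · rcases hv with h | h <;> subst h <;>
        simp_all [verificaLoop]
    · simp [verificaLoop, hv]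

-- ===== VERDICT (by name: the statement is the Claim_ definition above) =====
theorem verifica_tres_uns_spec : Claim_equal_verifica_tres_uns := by
  intro palavra _
  unfold Spec_verifica_tres_uns verifica_tres_uns verifica_tres_uns_alt
  rw [(verificaLoop_char palavra.toList).1]
  have key : palavra.toList.any (fun c => decide (¬ (c = '0' ∨ c = '1'))) =
      !palavra.toList.all (fun c => decide (c = '0' ∨ c = '1')) := by
    rw [Bool.eq_iff_iff]
    simp [List.any_eq_true]
  rw [key]
  cases hall : palavra.toList.all (fun c => decide (c = '0' ∨ c = '1')) <;> simp
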